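-- pv_equiv track=rewrite | github.com/henry0816191/boost-data-collector | boost_library_usage_dashboard/analyzer.py | _find_all_transitive_dependencies
-- ===== SOURCE A (Python) =====
-- from collections import defaultdict, deque
--
-- def _find_all_transitive_dependencies(main_lib_id: int, version_id: int, graph: dict[int, dict[int, list[int]]]) -> dict[int, int]:
--     if main_lib_id not in graph or version_id not in graph[main_lib_id]:
--         return {}
--     all_deps: dict[int, int] = {}
--     queue: deque[tuple[int, int]] = deque((dep_id, 1) for dep_id in graph[main_lib_id][version_id] if dep_id != main_lib_id)
--     visited = {main_lib_id}
--     while queue: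
--         lib_id, depth = queue.popleft()
--         if lib_id in visited:
--             continue
--         visited.add(lib_id)
--         all_deps[lib_id] = depth
--         for nxt in graph.get(lib_id, {}).get(version_id, []):
--             if nxt not in visited and nxt != main_lib_id:
--                 queue.append((nxt, depth + 1))
--     return all_deps
-- ===== SOURCE B (Python) =====
-- def _find_all_transitive_dependencies(main_lib_id: int, version_id: int, graph: dict[int, dict[int, list[int]]]) -> dict[int, int]:
--     if main_lib_id not in graph or version_id not in graph[main_lib_id]:
--         return {}
--     all_deps: dict[int, int] = {}
--     level = [d for d in graph[main_lib_id][version_id] if d != main_lib_id]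
--     depth = 1
--     while level:
--         fresh = list(dict.fromkeys(x for x in level if x not in all_deps))
--         for x in fresh:
--             all_deps[x] = depth
--         level = [n for x in fresh for n in graph.get(x, {}).get(version_id, [])
--                  if n != main_lib_id and n not in all_deps]
--         depth += 1
--     return all_deps
-- ===== Notes on version B (the rewrite author's own statement) =====
-- stated objective: alternative
-- what changed: Replaces A's flat FIFO deque of (lib_id, depth) pairs guarded by a visited set with a batch per-level computation: each round dedups the pending level against the result dict (dict.fromkeys), bulk-assigns the depth, and rebuilds the next level as one comprehension over the fresh nodes filtered against the updated dict - no visited set, no queue, no per-node skip branch.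
import Mathlib
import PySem

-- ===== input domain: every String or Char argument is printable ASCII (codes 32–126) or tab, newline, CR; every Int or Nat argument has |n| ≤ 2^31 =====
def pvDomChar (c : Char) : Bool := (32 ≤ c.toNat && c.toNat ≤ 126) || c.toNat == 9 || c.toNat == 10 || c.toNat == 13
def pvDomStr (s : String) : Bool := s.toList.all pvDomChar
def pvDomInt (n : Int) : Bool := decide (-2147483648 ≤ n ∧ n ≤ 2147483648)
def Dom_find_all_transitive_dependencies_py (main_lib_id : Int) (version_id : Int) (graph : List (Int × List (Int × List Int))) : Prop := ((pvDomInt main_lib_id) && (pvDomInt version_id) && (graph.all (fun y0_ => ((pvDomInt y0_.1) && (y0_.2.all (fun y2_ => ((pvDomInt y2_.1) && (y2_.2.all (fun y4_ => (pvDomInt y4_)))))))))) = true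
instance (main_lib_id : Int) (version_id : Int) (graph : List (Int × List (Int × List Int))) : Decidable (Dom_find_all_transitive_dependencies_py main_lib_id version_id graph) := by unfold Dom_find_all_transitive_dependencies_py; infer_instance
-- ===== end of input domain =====

-- B replaces A's flat depth-tagged FIFO queue + visited set with a batch per-level computation
-- (dedup the level against the result dict, bulk-assign the depth, rebuild the next level in one
-- comprehension): an alternative decomposition of the same BFS result, same asymptotic cost.

-- graph.get(lib_id, {}).get(version_id, []) as A's port phrases it
def pvNeigh (version_id : Int) (graph : List (Int × List (Int × List Int))) (lib : Int) : List Int :=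
  match (PySem.Dict.mk graph).get? lib with
  | none => []
  | some vm => (PySem.Dict.mk vm).getD version_id []

-- termination-measure machinery shared by the two ports' decreasing_by proofs
def pvKeys (graph : List (Int × List (Int × List Int))) : List Int :=
  PySem.List.dedup (graph.map Prod.fst)

def pvSum (version_id : Int) (graph : List (Int × List (Int × List Int))) (ks : List Int) : Nat :=
  ks.foldr (fun k s => 1 + (pvNeigh version_id graph k).length + s) 0

def pvPot (version_id : Int) (graph : List (Int × List (Int × List Int))) (visited : PySem.Set Int) : Nat :=
  pvSum version_id graph ((pvKeys graph).filter (fun k => !(PySem.Set.contains visited k)))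

theorem pvContains_false {s : PySem.Set Int} {x : Int} :
    PySem.Set.contains s x = false ↔ x ∉ s := by
  rw [← Bool.not_eq_true, not_iff_not]
  exact PySem.Set.contains_iff s x

theorem pvContains_add_ne {v : PySem.Set Int} {x y : Int} (h : y ≠ x) :
    PySem.Set.contains (PySem.Set.add v x) y = PySem.Set.contains v y := by
  rw [Bool.eq_iff_iff, PySem.Set.contains_iff, PySem.Set.contains_iff,
    PySem.Set.mem_add v x y]
  simp [h]

theorem pvSum_sublist {version_id : Int} {graph : List (Int × List (Int × List Int))}
    {l₁ l₂ : List Int} (h : l₁.Sublist l₂) :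
    pvSum version_id graph l₁ ≤ pvSum version_id graph l₂ := by
  induction h with
  | slnil => exact Nat.le_refl _
  | cons a _ ih => simp only [pvSum, List.foldr] at *; omega
  | cons₂ a _ ih => simp only [pvSum, List.foldr] at *; omega

theorem pvPot_add_le (version_id : Int) (graph : List (Int × List (Int × List Int)))
    (visited : PySem.Set Int) (x : Int) :
    pvPot version_id graph (PySem.Set.add visited x) ≤ pvPot version_id graph visited := by
  apply pvSum_sublist
  apply List.monotone_filter_right
  intro a ha
  simp only [Bool.not_eq_eq_eq_not, Bool.not_true, pvContains_false, PySem.Set.mem_add] at *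
  tauto

theorem pvSum_filter_gap (version_id : Int) (graph : List (Int × List (Int × List Int))) :
    ∀ (ks : List Int) (p p' : Int → Bool) (x : Int), ks.Nodup → x ∈ ks →
      p x = true → p' x = false → (∀ y ∈ ks, y ≠ x → p' y = p y) →
      pvSum version_id graph (ks.filter p') + (1 + (pvNeigh version_id graph x).length) ≤
        pvSum version_id graph (ks.filter p) := by
  intro ks
  induction ks with
  | nil => intro p p' x _ hx; cases hx
  | cons k ks ih =>
    intro p p' x hnd hx hpx hp'x hagree
    rcases List.mem_cons.mp hx with rfl | hx'
    · have hxks : x ∉ ks := (List.nodup_cons.mp hnd).1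
      have hfilt : ks.filter p' = ks.filter p := by
        apply List.filter_congr
        intro y hy
        exact hagree y (List.mem_cons_of_mem _ hy) (fun h => hxks (h ▸ hy))
      simp only [List.filter_cons, hpx, hp'x, Bool.false_eq_true, if_true, if_false, hfilt,
        pvSum, List.foldr]
      omega
    · have hkx : k ≠ x := by
        rintro rfl; exact (List.nodup_cons.mp hnd).1 hx'
      have hk : p' k = p k := hagree k (List.mem_cons_self) hkx
      have := ih p p' x (List.nodup_cons.mp hnd).2 hx' hpx hp'x
        (fun y hy hyx => hagree y (List.mem_cons_of_mem _ hy) hyx)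
      simp only [List.filter_cons, hk]
      cases hpk : p k <;>
        simp only [Bool.false_eq_true, if_true, if_false, pvSum, List.foldr] at * <;> omega

theorem pvPot_add_key (version_id : Int) (graph : List (Int × List (Int × List Int)))
    (visited : PySem.Set Int) (x : Int) (hk : x ∈ pvKeys graph)
    (hv : PySem.Set.contains visited x = false) :
    pvPot version_id graph (PySem.Set.add visited x) + (1 + (pvNeigh version_id graph x).length) ≤
      pvPot version_id graph visited := by
  apply pvSum_filter_gap version_id graph _ _ _ x (PySem.List.nodup_dedup _) hk
  · simp only [Bool.not_eq_eq_eq_not, Bool.not_true]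
    exact hv
  · simp
  · intro y _ hyx
    rw [pvContains_add_ne hyx]

theorem pvNeigh_of_not_key (version_id : Int) (graph : List (Int × List (Int × List Int)))
    (x : Int) (hx : x ∉ pvKeys graph) : pvNeigh version_id graph x = [] := by
  have hx' : x ∉ graph.map Prod.fst := by
    simpa [pvKeys, PySem.List.mem_dedup] using hx
  have hget : ∀ (l : List (Int × List (Int × List Int))), x ∉ l.map Prod.fst →
      (PySem.Dict.mk l).get? x = none := by
    intro l
    induction l with
    | nil => intro _; rfl
    | cons p rest ih =>
      intro hm
      obtain ⟨k, v⟩ := p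
      simp only [List.map_cons, List.mem_cons, not_or] at hm
      rw [PySem.Dict.get?_mk_cons, if_neg (by simpa using (Ne.symm hm.1)), ih hm.2]
  simp [pvNeigh, hget graph hx']

-- ===== PORT A =====  (FIFO queue of (lib_id, depth) pairs popped from the front, visited set)
def loopA (main_lib_id : Int) (version_id : Int) (graph : List (Int × List (Int × List Int))) :
    List (Int × Int) → PySem.Set Int → PySem.Dict Int Int → PySem.Dict Int Int
  | [], _, acc => acc
  | (lib, depth) :: rest, visited, acc =>
    if _h : PySem.Set.contains visited lib then
      loopA main_lib_id version_id graph rest visited acc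
    else
      loopA main_lib_id version_id graph
        ((pvNeigh version_id graph lib).foldl
          (fun q nxt =>
            if !(PySem.Set.contains (PySem.Set.add visited lib) nxt) && (nxt != main_lib_id) then
              q ++ [(nxt, depth + 1)]
            else q)
          rest)
        (PySem.Set.add visited lib)
        (acc.insert lib depth)
  termination_by q v _ => pvPot version_id graph v + q.length
  decreasing_by
  · simp only [List.length_cons]; omega
  · simp only [dite_eq_ite]
    rw [PySem.List.foldl_append_if]
    simp only [List.length_append, List.length_map]
    have hle := List.length_filter_le
      (fun nxt => !(PySem.Set.contains (PySem.Set.add visited lib) nxt) && (nxt != main_lib_id))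
      (pvNeigh version_id graph lib)
    by_cases hk : lib ∈ pvKeys graph
    · have := pvPot_add_key version_id graph visited lib hk (by simpa using _h)
      simp only [List.length_cons]
      omega
    · have h0 : pvNeigh version_id graph lib = [] := pvNeigh_of_not_key version_id graph lib hk
      have := pvPot_add_le version_id graph visited lib
      simp only [h0, List.filter_nil, List.length_nil, List.length_cons]
      omega

def find_all_transitive_dependencies_py (main_lib_id : Int) (version_id : Int)
    (graph : List (Int × List (Int × List Int))) : List (Int × Int) :=
  match (PySem.Dict.mk graph).get? main_lib_id with
  | none => []
  | some vm =>
    match (PySem.Dict.mk vm).get? version_id with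
    | none => []
    | some deps =>
      (loopA main_lib_id version_id graph
        ((deps.filter (fun dep => dep != main_lib_id)).map (fun dep => (dep, (1 : Int))))
        (PySem.Set.add PySem.Set.empty main_lib_id)
        PySem.Dict.empty).items

-- ===== PORT B =====  (batch per level: dedup against the result dict, bulk-assign, rebuild)
-- graph.get(x, {}).get(version_id, []) as B's Python phrases it (default-lookups, no match)
def pvNeighB (version_id : Int) (graph : List (Int × List (Int × List Int))) (x : Int) : List Int :=
  (PySem.Dict.mk ((PySem.Dict.mk graph).getD x [])).getD version_id []

-- list(dict.fromkeys(x for x in level if x not in all_deps))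
def pvFresh (all_deps : PySem.Dict Int Int) (level : List Int) : List Int :=
  PySem.List.dedup (level.filter (fun x => !all_deps.contains x))

-- for x in fresh: all_deps[x] = depth
def pvMark (depth : Int) (all_deps : PySem.Dict Int Int) (fresh : List Int) : PySem.Dict Int Int :=
  fresh.foldl (fun a x => a.insert x depth) all_deps

-- [n for x in fresh for n in graph.get(x, {}).get(version_id, []) if n != main and n not in all_deps]
def pvSpread (main_lib_id : Int) (version_id : Int) (graph : List (Int × List (Int × List Int)))
    (all_deps : PySem.Dict Int Int) (fresh : List Int) : List Int :=
  fresh.flatMap (fun x =>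
    (pvNeighB version_id graph x).filter (fun n => n != main_lib_id && !all_deps.contains n))

-- measure machinery for levelsB's termination
def pvPotD (version_id : Int) (graph : List (Int × List (Int × List Int)))
    (all_deps : PySem.Dict Int Int) : Nat :=
  pvSum version_id graph ((pvKeys graph).filter (fun k => !all_deps.contains k))

theorem pvNeighB_eq_pvNeigh (version_id : Int) (graph : List (Int × List (Int × List Int)))
    (x : Int) : pvNeighB version_id graph x = pvNeigh version_id graph x := by
  unfold pvNeighB pvNeigh
  cases h : (PySem.Dict.mk graph).get? x with
  | none =>
    rw [show (PySem.Dict.mk graph).getD x ([] : List (Int × List Int)) = [] from by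
      rw [PySem.Dict.getD_eq_get?_getD, h]; rfl]
    rfl
  | some vm =>
    rw [PySem.Dict.getD_of_get?_eq_some _ [] h]

theorem pvPotD_insert_le (version_id : Int) (graph : List (Int × List (Int × List Int)))
    (a : PySem.Dict Int Int) (x d0 : Int) :
    pvPotD version_id graph (a.insert x d0) ≤ pvPotD version_id graph a := by
  apply pvSum_sublist
  apply List.monotone_filter_right
  intro k hk
  simp only [PySem.Dict.contains_insert, Bool.not_eq_true', Bool.or_eq_false_iff] at hk
  simp [hk.2]

theorem pvPotD_insert_key (version_id : Int) (graph : List (Int × List (Int × List Int)))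
    (a : PySem.Dict Int Int) (x d0 : Int) (hk : x ∈ pvKeys graph) (hc : a.contains x = false) :
    pvPotD version_id graph (a.insert x d0) + (1 + (pvNeigh version_id graph x).length) ≤
      pvPotD version_id graph a := by
  apply pvSum_filter_gap version_id graph _ _ _ x (PySem.List.nodup_dedup _) hk
  · simp [hc]
  · simp [PySem.Dict.contains_insert_self]
  · intro y _ hyx
    simp [PySem.Dict.contains_insert, hyx]

theorem pvPotD_mark (version_id : Int) (graph : List (Int × List (Int × List Int))) (d0 : Int) :
    ∀ (F : List Int) (a : PySem.Dict Int Int), F.Nodup →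
      (∀ y ∈ F, a.contains y = false) →
      pvPotD version_id graph (pvMark d0 a F) +
        pvSum version_id graph (F.filter (fun k => decide (k ∈ pvKeys graph))) ≤
      pvPotD version_id graph a := by
  intro F
  induction F with
  | nil => intro a _ _; simp [pvMark, pvSum]
  | cons x F' ih =>
    intro a hnd hfr
    have hx : a.contains x = false := hfr x List.mem_cons_self
    have hmark : pvMark d0 a (x :: F') = pvMark d0 (a.insert x d0) F' := rfl
    have hfr' : ∀ y ∈ F', (a.insert x d0).contains y = false := by
      intro y hy
      have hyx : y ≠ x := by rintro rfl; exact (List.nodup_cons.mp hnd).1 hy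
      simp [PySem.Dict.contains_insert, hyx, hfr y (List.mem_cons_of_mem _ hy)]
    have ih' := ih (a.insert x d0) (List.nodup_cons.mp hnd).2 hfr'
    rw [hmark]
    by_cases hk : x ∈ pvKeys graph
    · have h2 := pvPotD_insert_key version_id graph a x d0 hk hx
      simp only [List.filter_cons, hk, decide_true, if_true, pvSum, List.foldr] at *
      omega
    · have h2 := pvPotD_insert_le version_id graph a x d0
      simp only [List.filter_cons, hk, decide_false, Bool.false_eq_true, if_false] at *
      omega

theorem pvSpread_len (main_lib_id version_id : Int) (graph : List (Int × List (Int × List Int)))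
    (a : PySem.Dict Int Int) :
    ∀ F : List Int,
      (pvSpread main_lib_id version_id graph a F).length +
        (F.filter (fun k => decide (k ∈ pvKeys graph))).length ≤
      pvSum version_id graph (F.filter (fun k => decide (k ∈ pvKeys graph))) := by
  have hsp : ∀ F : List Int, pvSpread main_lib_id version_id graph a F =
      F.flatMap (fun x =>
        (pvNeigh version_id graph x).filter (fun n => n != main_lib_id && !a.contains n)) := by
    intro F
    simp [pvSpread, pvNeighB_eq_pvNeigh]
  intro F
  rw [hsp]
  induction F with
  | nil => simp [pvSum]
  | cons x F' ih =>
    rw [List.flatMap_cons, List.length_append]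
    have hle := List.length_filter_le
      (fun n => n != main_lib_id && !a.contains n) (pvNeigh version_id graph x)
    by_cases hk : x ∈ pvKeys graph
    · simp only [List.filter_cons, hk, decide_true, if_true, List.length_cons, pvSum,
        List.foldr] at *
      omega
    · have h0 : pvNeigh version_id graph x = [] := pvNeigh_of_not_key version_id graph x hk
      rw [h0] at hle ⊢
      simp only [List.filter_nil, List.length_nil, List.filter_cons, hk, decide_false,
        Bool.false_eq_true, if_false] at *
      omega

theorem pvFresh_len_le (a : PySem.Dict Int Int) (l : List Int) :
    (pvFresh a l).length ≤ l.length := by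
  unfold pvFresh
  rw [PySem.List.dedup_eq_ofList]
  exact Nat.le_trans (PySem.Set.length_ofList_le _) (List.length_filter_le _ _)

def levelsB (main_lib_id : Int) (version_id : Int) (graph : List (Int × List (Int × List Int))) :
    List Int → Int → PySem.Dict Int Int → PySem.Dict Int Int
  | [], _, all_deps => all_deps
  | x :: xs, depth, all_deps =>
    levelsB main_lib_id version_id graph
      (pvSpread main_lib_id version_id graph
        (pvMark depth all_deps (pvFresh all_deps (x :: xs))) (pvFresh all_deps (x :: xs)))
      (depth + 1)
      (pvMark depth all_deps (pvFresh all_deps (x :: xs)))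
  termination_by level _ all_deps =>
    pvPotD version_id graph all_deps + (pvFresh all_deps level).length +
      (if level.isEmpty then 0 else 1)
  decreasing_by
    by_cases hFnil : pvFresh all_deps (x :: xs) = []
    · rw [hFnil]
      have hmark : pvMark depth all_deps ([] : List Int) = all_deps := rfl
      have hspread : pvSpread main_lib_id version_id graph all_deps ([] : List Int) = [] := rfl
      rw [hmark, hspread]
      simp [pvFresh]
    · have hnd : (pvFresh all_deps (x :: xs)).Nodup := by
        unfold pvFresh; exact PySem.List.nodup_dedup _
      have hfr : ∀ y ∈ pvFresh all_deps (x :: xs), all_deps.contains y = false := by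
        intro y hy
        unfold pvFresh at hy
        rw [PySem.List.mem_dedup] at hy
        have := List.of_mem_filter hy
        simpa using this
      have h1 := pvPotD_mark version_id graph depth (pvFresh all_deps (x :: xs)) all_deps hnd hfr
      have h2 := pvSpread_len main_lib_id version_id graph
        (pvMark depth all_deps (pvFresh all_deps (x :: xs))) (pvFresh all_deps (x :: xs))
      have h3 := pvFresh_len_le (pvMark depth all_deps (pvFresh all_deps (x :: xs)))
        (pvSpread main_lib_id version_id graph
          (pvMark depth all_deps (pvFresh all_deps (x :: xs))) (pvFresh all_deps (x :: xs)))
      have h4 : 1 ≤ (pvFresh all_deps (x :: xs)).length :=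
        List.length_pos_iff.mpr hFnil
      have h5 : (if (pvSpread main_lib_id version_id graph
          (pvMark depth all_deps (pvFresh all_deps (x :: xs)))
          (pvFresh all_deps (x :: xs))).isEmpty then 0 else 1) ≤ 1 := by
        split <;> omega
      have hflag : (if ((x :: xs).isEmpty) then (0:Nat) else 1) = 1 := rfl
      rw [hflag]
      omega

def find_all_transitive_dependencies_py_alt (main_lib_id : Int) (version_id : Int)
    (graph : List (Int × List (Int × List Int))) : List (Int × Int) :=
  if (PySem.Dict.mk graph).contains main_lib_id &&
      (PySem.Dict.mk ((PySem.Dict.mk graph).getD main_lib_id [])).contains version_id then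
    (levelsB main_lib_id version_id graph
      ((pvNeighB version_id graph main_lib_id).filter (fun d => d != main_lib_id))
      1 PySem.Dict.empty).items
  else []

-- ===== PRECONDITION & SPEC =====
def Spec_find_all_transitive_dependencies_py (main_lib_id : Int) (version_id : Int) (graph : List (Int × List (Int × List Int))) (out : List (Int × Int)) : Prop := out = find_all_transitive_dependencies_py_alt main_lib_id version_id graph
instance (main_lib_id : Int) (version_id : Int) (graph : List (Int × List (Int × List Int))) (out : List (Int × Int)) : Decidable (Spec_find_all_transitive_dependencies_py main_lib_id version_id graph out) := by unfold Spec_find_all_transitive_dependencies_py; infer_instance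

-- ===== CLAIM (what is proved, stated in full; the proofs are below) =====
def Claim_equal_find_all_transitive_dependencies_py : Prop := ∀ (main_lib_id : Int) (version_id : Int) (graph : List (Int × List (Int × List Int))), Dom_find_all_transitive_dependencies_py main_lib_id version_id graph → Spec_find_all_transitive_dependencies_py main_lib_id version_id graph (find_all_transitive_dependencies_py main_lib_id version_id graph)


-- ===== LEMMAS AND PROOFS =====

-- ofList commutes with filter (first-occurrence dedup of a filtered list)
theorem pvOfList_filter : ∀ (L : List Int) (p : Int → Bool),
    PySem.Set.ofList (L.filter p) = (PySem.Set.ofList L).filter p := by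
  intro L
  induction L with
  | nil => intro p; rfl
  | cons x L' ih =>
    intro p
    rw [PySem.Set.ofList_cons]
    by_cases hp : p x = true
    · rw [List.filter_cons_of_pos hp, PySem.Set.ofList_cons, ih]
      simp only [PySem.Set.discard, List.filter_cons_of_pos hp, List.filter_filter]
      congr 1
      apply List.filter_congr
      intro y _
      rw [Bool.and_comm]
    · rw [List.filter_cons_of_neg hp, ih]
      simp only [PySem.Set.discard, List.filter_cons_of_neg hp, List.filter_filter]
      apply List.filter_congr
      intro y _
      by_cases hyx : y = x
      · subst hyx
        simp [hp]
      · simp [hyx]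

theorem pvFresh_nil (a : PySem.Dict Int Int) : pvFresh a [] = [] := rfl

theorem pvFresh_cons_old {a : PySem.Dict Int Int} {lib : Int} (Q : List Int)
    (h : a.contains lib = true) : pvFresh a (lib :: Q) = pvFresh a Q := by
  simp [pvFresh, h]

theorem pvFresh_cons_new {a : PySem.Dict Int Int} {lib : Int} (Q : List Int) (d0 : Int)
    (h : a.contains lib = false) :
    pvFresh a (lib :: Q) = lib :: pvFresh (a.insert lib d0) Q := by
  unfold pvFresh
  rw [PySem.List.dedup_eq_ofList, PySem.List.dedup_eq_ofList,
    List.filter_cons_of_pos (by simp [h]), PySem.Set.ofList_cons]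
  congr 1
  show (PySem.Set.ofList (List.filter (fun x => !a.contains x) Q)).discard lib = _
  simp only [PySem.Set.discard]
  rw [← pvOfList_filter, List.filter_filter]
  congr 1
  apply List.filter_congr
  intro y _
  simp only [PySem.Dict.contains_insert, Bool.not_or]

theorem pvFresh_nil_all {a : PySem.Dict Int Int} {Q : List Int} (h : pvFresh a Q = []) :
    ∀ y ∈ Q, a.contains y = true := by
  intro y hy
  by_contra hc
  have hcf : a.contains y = false := by simpa using hc
  have hmem : y ∈ Q.filter (fun x => !a.contains x) :=
    List.mem_filter.mpr ⟨hy, by simp [hcf]⟩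
  have : y ∈ pvFresh a Q := by
    unfold pvFresh
    rw [PySem.List.mem_dedup]
    exact hmem
  rw [h] at this
  cases this

theorem pvMark_nil (d0 : Int) (a : PySem.Dict Int Int) : pvMark d0 a [] = a := rfl

theorem pvMark_cons (d0 : Int) (a : PySem.Dict Int Int) (x : Int) (F : List Int) :
    pvMark d0 a (x :: F) = pvMark d0 (a.insert x d0) F := rfl

theorem pvMark_keys_nodup (d0 : Int) (a : PySem.Dict Int Int) (F : List Int)
    (h : a.keys.Nodup) : (pvMark d0 a F).keys.Nodup :=
  PySem.Dict.nodup_keys_foldl_insert F (fun _ _ => d0) a h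

theorem pvMark_contains (d0 : Int) (a : PySem.Dict Int Int) (F : List Int) (y : Int) :
    (pvMark d0 a F).contains y = true ↔ y ∈ F ∨ a.contains y = true := by
  unfold pvMark
  rw [PySem.Dict.contains_iff_mem_keys,
    PySem.Dict.keys_foldl_insert F (fun _ _ => d0) a, PySem.Set.mem_update,
    ← PySem.Dict.contains_iff_mem_keys]
  tauto

theorem pvMark_contains_mono (d0 : Int) (a : PySem.Dict Int Int) (F : List Int) (y : Int)
    (h : a.contains y = true) : (pvMark d0 a F).contains y = true :=
  (pvMark_contains d0 a F y).mpr (Or.inr h)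

theorem pvSpread_nil (main_lib_id version_id : Int) (graph : List (Int × List (Int × List Int)))
    (a : PySem.Dict Int Int) : pvSpread main_lib_id version_id graph a [] = [] := rfl

theorem pvSpread_cons (main_lib_id version_id : Int) (graph : List (Int × List (Int × List Int)))
    (a : PySem.Dict Int Int) (x : Int) (F : List Int) :
    pvSpread main_lib_id version_id graph a (x :: F) =
      (pvNeigh version_id graph x).filter (fun n => n != main_lib_id && !a.contains n) ++
        pvSpread main_lib_id version_id graph a F := by
  simp [pvSpread, pvNeighB_eq_pvNeigh]

theorem pvSpread_filter_self (main_lib_id version_id : Int)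
    (graph : List (Int × List (Int × List Int))) (a : PySem.Dict Int Int) (F : List Int) :
    (pvSpread main_lib_id version_id graph a F).filter (fun n => !a.contains n) =
      pvSpread main_lib_id version_id graph a F := by
  apply List.filter_eq_self.mpr
  intro x hx
  unfold pvSpread at hx
  rw [List.mem_flatMap] at hx
  obtain ⟨y, _, hy⟩ := hx
  have := List.of_mem_filter hy
  exact (Bool.and_elim_right this)

-- B's loop returns its accumulator whenever the pending level dedups to nothing
theorem levelsB_nilFresh (main_lib_id version_id : Int)
    (graph : List (Int × List (Int × List Int))) (d : Int) (a : PySem.Dict Int Int)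
    {l : List Int} (h : pvFresh a l = []) :
    levelsB main_lib_id version_id graph l d a = a := by
  cases l with
  | nil => rw [levelsB]
  | cons x xs =>
    rw [levelsB, h, pvMark_nil, pvSpread_nil, levelsB]

-- B's loop depends on the pending level only through its dedup against the dict
theorem levelsB_congr (main_lib_id version_id : Int)
    (graph : List (Int × List (Int × List Int))) (d : Int) (a : PySem.Dict Int Int)
    {l₁ l₂ : List Int} (h : pvFresh a l₁ = pvFresh a l₂) :
    levelsB main_lib_id version_id graph l₁ d a =
      levelsB main_lib_id version_id graph l₂ d a := by
  by_cases h1 : pvFresh a l₁ = []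
  · rw [levelsB_nilFresh _ _ _ _ _ h1, levelsB_nilFresh _ _ _ _ _ (h ▸ h1)]
  · cases l₁ with
    | nil => exact absurd rfl h1
    | cons x xs =>
      cases l₂ with
      | nil => exact absurd (h.trans (pvFresh_nil a)) h1
      | cons y ys =>
        conv_lhs => rw [levelsB]
        conv_rhs => rw [levelsB]
        rw [h]

-- A's level-drain: what one pass of the queue over the untagged node list Q does
def drain (main_lib_id version_id : Int) (graph : List (Int × List (Int × List Int))) (d : Int) :
    List Int → PySem.Set Int → PySem.Dict Int Int →
      PySem.Set Int × PySem.Dict Int Int × List (Int × Int)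
  | [], v, a => (v, a, [])
  | lib :: Q, v, a =>
    if PySem.Set.contains v lib then drain main_lib_id version_id graph d Q v a
    else
      ((drain main_lib_id version_id graph d Q (PySem.Set.add v lib) (a.insert lib d)).1,
       (drain main_lib_id version_id graph d Q (PySem.Set.add v lib) (a.insert lib d)).2.1,
       ((pvNeigh version_id graph lib).filter
           (fun n => !(PySem.Set.contains (PySem.Set.add v lib) n) && (n != main_lib_id))).map
         (fun n => (n, d + 1)) ++
       (drain main_lib_id version_id graph d Q (PySem.Set.add v lib) (a.insert lib d)).2.2)

theorem drain_all_visited (main_lib_id version_id : Int)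
    (graph : List (Int × List (Int × List Int))) (d : Int) :
    ∀ (Q : List Int) (v : PySem.Set Int) (a : PySem.Dict Int Int),
      (∀ y ∈ Q, y ∈ v) →
      drain main_lib_id version_id graph d Q v a = (v, a, []) := by
  intro Q
  induction Q with
  | nil => intro v a _; rfl
  | cons lib Q' ih =>
    intro v a hall
    have hv : PySem.Set.contains v lib = true :=
      (PySem.Set.contains_iff v lib).mpr (hall lib List.mem_cons_self)
    rw [drain, if_pos hv]
    exact ih v a (fun y hy => hall y (List.mem_cons_of_mem _ hy))

-- shifting A's loop over one level: processing the depth-d prefix is exactly drain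
theorem loopA_drain (main_lib_id version_id : Int)
    (graph : List (Int × List (Int × List Int))) (d : Int) :
    ∀ (Q : List Int) (R : List (Int × Int)) (v : PySem.Set Int) (a : PySem.Dict Int Int),
      loopA main_lib_id version_id graph (Q.map (fun x => (x, d)) ++ R) v a =
        loopA main_lib_id version_id graph
          (R ++ (drain main_lib_id version_id graph d Q v a).2.2)
          (drain main_lib_id version_id graph d Q v a).1
          (drain main_lib_id version_id graph d Q v a).2.1 := by
  intro Q
  induction Q with
  | nil => intro R v a; simp [drain]
  | cons lib Q' ih =>
    intro R v a
    rw [List.map_cons, List.cons_append]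
    by_cases h : PySem.Set.contains v lib = true
    · rw [show loopA main_lib_id version_id graph
          ((lib, d) :: (Q'.map (fun x => (x, d)) ++ R)) v a =
          loopA main_lib_id version_id graph (Q'.map (fun x => (x, d)) ++ R) v a from by
        rw [loopA, dif_pos h]]
      rw [ih R v a, drain, if_pos h]
    · have hb : PySem.Set.contains v lib = false := by simpa using h
      rw [show loopA main_lib_id version_id graph
          ((lib, d) :: (Q'.map (fun x => (x, d)) ++ R)) v a =
          loopA main_lib_id version_id graph
            ((Q'.map (fun x => (x, d)) ++ R) ++
              ((pvNeigh version_id graph lib).filter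
                  (fun n => !(PySem.Set.contains (PySem.Set.add v lib) n) &&
                    (n != main_lib_id))).map (fun n => (n, d + 1)))
            (PySem.Set.add v lib) (a.insert lib d) from by
        rw [loopA, dif_neg h, PySem.List.foldl_append_if]]
      rw [List.append_assoc, ih _ _ _, drain, if_neg h, List.append_assoc]

-- full characterisation of drain in terms of B's per-level primitives
theorem drainChar (main_lib_id version_id : Int)
    (graph : List (Int × List (Int × List Int))) (d : Int) :
    ∀ (Q : List Int) (v : PySem.Set Int) (a : PySem.Dict Int Int),
      a.keys.Nodup →
      (∀ y : Int, y ∈ v ↔ y = main_lib_id ∨ a.contains y = true) →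
      main_lib_id ∉ Q →
      (drain main_lib_id version_id graph d Q v a).2.1 = pvMark d a (pvFresh a Q) ∧
      (∀ y : Int, y ∈ (drain main_lib_id version_id graph d Q v a).1 ↔
          y = main_lib_id ∨ (pvMark d a (pvFresh a Q)).contains y = true) ∧
      ((drain main_lib_id version_id graph d Q v a).2.2 =
        ((drain main_lib_id version_id graph d Q v a).2.2.map Prod.fst).map
          (fun n => (n, d + 1))) ∧
      (main_lib_id ∉ (drain main_lib_id version_id graph d Q v a).2.2.map Prod.fst) ∧
      (((drain main_lib_id version_id graph d Q v a).2.2.map Prod.fst).filter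
          (fun n => !(pvMark d a (pvFresh a Q)).contains n) =
        pvSpread main_lib_id version_id graph (pvMark d a (pvFresh a Q)) (pvFresh a Q)) := by
  intro Q
  induction Q with
  | nil =>
    intro v a _ hInv _
    refine ⟨rfl, ?_, rfl, by simp [drain], rfl⟩
    intro y
    exact hInv y
  | cons lib Q' ih =>
    intro v a hnd hInv hm
    have hlib : lib ≠ main_lib_id := fun he => hm (he ▸ List.mem_cons_self)
    have hm' : main_lib_id ∉ Q' := fun he => hm (List.mem_cons_of_mem _ he)
    by_cases hc : a.contains lib = true
    · have hvb : PySem.Set.contains v lib = true :=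
        (PySem.Set.contains_iff v lib).mpr ((hInv lib).mpr (Or.inr hc))
      rw [drain, if_pos hvb, pvFresh_cons_old Q' hc]
      exact ih v a hnd hInv hm'
    · have hcf : a.contains lib = false := by simpa using hc
      have hvb : PySem.Set.contains v lib = false := by
        rw [pvContains_false]
        intro hvv
        rcases (hInv lib).mp hvv with h1 | h2
        · exact hlib h1
        · simp [hcf] at h2
      have hInv1 : ∀ y : Int, y ∈ PySem.Set.add v lib ↔
          y = main_lib_id ∨ (a.insert lib d).contains y = true := by
        intro y
        rw [PySem.Set.mem_add, hInv y, PySem.Dict.contains_insert]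
        simp only [Bool.or_eq_true, beq_iff_eq]
        tauto
      obtain ⟨h1, h2, h3, h4, h5⟩ :=
        ih (PySem.Set.add v lib) (a.insert lib d)
          (PySem.Dict.nodup_keys_insert a lib d hnd) hInv1 hm'
      have hF : pvFresh a (lib :: Q') = lib :: pvFresh (a.insert lib d) Q' :=
        pvFresh_cons_new Q' d hcf
      have hMk : pvMark d a (pvFresh a (lib :: Q')) =
          pvMark d (a.insert lib d) (pvFresh (a.insert lib d) Q') := by
        rw [hF, pvMark_cons]
      rw [drain, if_neg (by rw [hvb]; simp), hMk]
      dsimp only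
      have hid : ∀ L : List Int, (L.map (fun n => (n, d + 1))).map Prod.fst = L := by
        intro L
        rw [List.map_map,
          show (Prod.fst ∘ (fun n : Int => ((n, d + 1) : Int × Int))) = id from rfl,
          List.map_id]
      refine ⟨h1, h2, ?_, ?_, ?_⟩
      · rw [List.map_append, hid, List.map_append, ← h3]
      · rw [List.map_append, hid]
        rw [List.mem_append, not_or]
        refine ⟨?_, h4⟩
        intro hmm
        have hp := List.of_mem_filter hmm
        simp at hp
      · rw [List.map_append, hid, List.filter_append, hF, pvSpread_cons]
        congr 1
        · rw [List.filter_filter]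
          apply List.filter_congr
          intro n _
          by_cases hnm : n = main_lib_id
          · subst hnm
            simp
          · by_cases hA : (pvMark d (a.insert lib d)
                (pvFresh (a.insert lib d) Q')).contains n = true
            · simp [hA]
            · have hAf : (pvMark d (a.insert lib d)
                  (pvFresh (a.insert lib d) Q')).contains n = false := by simpa using hA
              have hnv : PySem.Set.contains (PySem.Set.add v lib) n = false := by
                rw [pvContains_false]
                intro hin
                rcases (PySem.Set.mem_add v lib n).mp hin with hin' | heq
                · rcases (hInv n).mp hin' with h1' | h2'
                  · exact hnm h1'
                  · have := pvMark_contains_mono d (a.insert lib d)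
                      (pvFresh (a.insert lib d) Q') n
                      (by rw [PySem.Dict.contains_insert, h2']; simp)
                    rw [hAf] at this; cases this
                · have := pvMark_contains_mono d (a.insert lib d)
                    (pvFresh (a.insert lib d) Q') n
                    (by rw [heq]; exact PySem.Dict.contains_insert_self a lib d)
                  rw [hAf] at this; cases this
              have hnv' : n ∉ PySem.Set.add v lib := pvContains_false.mp hnv
              rw [PySem.Set.mem_add] at hnv'
              rw [not_or] at hnv'
              simp [hAf, hnv'.1, hnv'.2]

-- the bridge: A's depth-tagged queue loop equals B's per-level batch loop
theorem bridgeLoop (main_lib_id version_id : Int)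
    (graph : List (Int × List (Int × List Int))) :
    ∀ (N : Nat) (d : Int) (Q : List Int) (v : PySem.Set Int) (a : PySem.Dict Int Int),
      pvPotD version_id graph a + (pvFresh a Q).length +
        (if Q.isEmpty then 0 else 1) ≤ N →
      a.keys.Nodup →
      (∀ y : Int, y ∈ v ↔ y = main_lib_id ∨ a.contains y = true) →
      main_lib_id ∉ Q →
      loopA main_lib_id version_id graph (Q.map (fun x => (x, d))) v a =
        levelsB main_lib_id version_id graph Q d a := by
  intro N
  induction N with
  | zero =>
    intro d Q v a hle _ _ _
    have hQ : Q = [] := by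
      cases Q with
      | nil => rfl
      | cons x xs =>
        have : (if (x :: xs).isEmpty then (0:Nat) else 1) = 1 := rfl
        rw [this] at hle
        omega
    subst hQ
    rw [List.map_nil, loopA, levelsB]
  | succ N ihN =>
    intro d Q v a hle hnd hInv hm
    cases Q with
    | nil => rw [List.map_nil, loopA, levelsB]
    | cons x xs =>
      by_cases hFnil : pvFresh a (x :: xs) = []
      · have hall : ∀ y ∈ x :: xs, y ∈ v := fun y hy =>
          (hInv y).mpr (Or.inr (pvFresh_nil_all hFnil y hy))
        have hshift := loopA_drain main_lib_id version_id graph d (x :: xs) [] v a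
        rw [List.append_nil] at hshift
        rw [hshift, drain_all_visited main_lib_id version_id graph d (x :: xs) v a hall]
        show loopA main_lib_id version_id graph [] v a = _
        rw [loopA, levelsB, hFnil, pvMark_nil, pvSpread_nil, levelsB]
      · obtain ⟨h1, h2, h3, h4, h5⟩ :=
          drainChar main_lib_id version_id graph d (x :: xs) v a hnd hInv hm
        have hshift := loopA_drain main_lib_id version_id graph d (x :: xs) [] v a
        rw [List.append_nil] at hshift
        have hnd' : (pvFresh a (x :: xs)).Nodup := PySem.List.nodup_dedup _
        have hfr : ∀ y ∈ pvFresh a (x :: xs), a.contains y = false := by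
          intro y hy
          unfold pvFresh at hy
          rw [PySem.List.mem_dedup] at hy
          simpa using List.of_mem_filter hy
        have hfQ2 : pvFresh (pvMark d a (pvFresh a (x :: xs)))
            ((drain main_lib_id version_id graph d (x :: xs) v a).2.2.map Prod.fst) =
            PySem.List.dedup (pvSpread main_lib_id version_id graph
              (pvMark d a (pvFresh a (x :: xs))) (pvFresh a (x :: xs))) := by
          have hrfl : pvFresh (pvMark d a (pvFresh a (x :: xs)))
              ((drain main_lib_id version_id graph d (x :: xs) v a).2.2.map Prod.fst) =
              PySem.List.dedup
                (((drain main_lib_id version_id graph d (x :: xs) v a).2.2.map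
                    Prod.fst).filter
                  (fun n => !(pvMark d a (pvFresh a (x :: xs))).contains n)) := rfl
          rw [hrfl, h5]
        have hMark := pvPotD_mark version_id graph d (pvFresh a (x :: xs)) a hnd' hfr
        have hSlen := pvSpread_len main_lib_id version_id graph
          (pvMark d a (pvFresh a (x :: xs))) (pvFresh a (x :: xs))
        have hdedup : (PySem.List.dedup (pvSpread main_lib_id version_id graph
            (pvMark d a (pvFresh a (x :: xs))) (pvFresh a (x :: xs)))).length ≤
            (pvSpread main_lib_id version_id graph
              (pvMark d a (pvFresh a (x :: xs))) (pvFresh a (x :: xs))).length := by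
          rw [PySem.List.dedup_eq_ofList]
          exact PySem.Set.length_ofList_le _
        have hFpos : 1 ≤ (pvFresh a (x :: xs)).length := List.length_pos_iff.mpr hFnil
        have hflagQ : (if (x :: xs).isEmpty then (0:Nat) else 1) = 1 := rfl
        rw [hflagQ] at hle
        have hmeas : pvPotD version_id graph (pvMark d a (pvFresh a (x :: xs))) +
            (pvFresh (pvMark d a (pvFresh a (x :: xs)))
              ((drain main_lib_id version_id graph d (x :: xs) v a).2.2.map Prod.fst)).length +
            (if ((drain main_lib_id version_id graph d (x :: xs) v a).2.2.map
              Prod.fst).isEmpty then 0 else 1) ≤ N := by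
          have hflag : (if ((drain main_lib_id version_id graph d (x :: xs) v a).2.2.map
              Prod.fst).isEmpty then (0:Nat) else 1) ≤ 1 := by split <;> omega
          rw [hfQ2]
          omega
        have hrec := ihN (d + 1)
          ((drain main_lib_id version_id graph d (x :: xs) v a).2.2.map Prod.fst)
          (drain main_lib_id version_id graph d (x :: xs) v a).1
          (pvMark d a (pvFresh a (x :: xs)))
          hmeas (pvMark_keys_nodup d a _ hnd) h2 h4
        rw [hshift, List.nil_append, h1, h3, hrec]
        conv_rhs => rw [levelsB]
        apply levelsB_congr
        rw [hfQ2]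
        rw [show pvFresh (pvMark d a (pvFresh a (x :: xs)))
              (pvSpread main_lib_id version_id graph (pvMark d a (pvFresh a (x :: xs)))
                (pvFresh a (x :: xs))) =
            PySem.List.dedup
              ((pvSpread main_lib_id version_id graph (pvMark d a (pvFresh a (x :: xs)))
                  (pvFresh a (x :: xs))).filter
                (fun n => !(pvMark d a (pvFresh a (x :: xs))).contains n)) from rfl,
          pvSpread_filter_self]

-- ===== VERDICT (by name: the statement is the Claim_ definition above) =====
theorem find_all_transitive_dependencies_py_spec :
    Claim_equal_find_all_transitive_dependencies_py := by
  intro main_lib_id version_id graph _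
  unfold Spec_find_all_transitive_dependencies_py
  unfold find_all_transitive_dependencies_py find_all_transitive_dependencies_py_alt
  cases hm : (PySem.Dict.mk graph).get? main_lib_id with
  | none =>
    have hcm : (PySem.Dict.mk graph).contains main_lib_id = false := by
      rw [PySem.Dict.contains_eq_isSome_get?, hm]; rfl
    simp [hcm]
  | some vm =>
    have hgd : (PySem.Dict.mk graph).getD main_lib_id [] = vm :=
      PySem.Dict.getD_of_get?_eq_some _ [] hm
    dsimp only
    cases hv : (PySem.Dict.mk vm).get? version_id with
    | none =>
      have hcv : (PySem.Dict.mk ((PySem.Dict.mk graph).getD main_lib_id [])).contains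
          version_id = false := by
        rw [hgd, PySem.Dict.contains_eq_isSome_get?, hv]; rfl
      simp [hcv]
    | some deps =>
      have hcm : (PySem.Dict.mk graph).contains main_lib_id = true := by
        rw [PySem.Dict.contains_eq_isSome_get?, hm]; rfl
      have hcv : (PySem.Dict.mk ((PySem.Dict.mk graph).getD main_lib_id [])).contains
          version_id = true := by
        rw [hgd, PySem.Dict.contains_eq_isSome_get?, hv]; rfl
      rw [if_pos (by rw [hcm, hcv]; rfl)]
      have hnB : pvNeighB version_id graph main_lib_id = deps := by
        unfold pvNeighB
        rw [hgd, PySem.Dict.getD_of_get?_eq_some _ [] hv]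
      rw [hnB]
      have hInv0 : ∀ y : Int, y ∈ PySem.Set.add PySem.Set.empty main_lib_id ↔
          y = main_lib_id ∨ (PySem.Dict.empty : PySem.Dict Int Int).contains y = true := by
        intro y
        rw [PySem.Set.mem_add]
        simp [PySem.Set.empty, PySem.Dict.contains_empty]
      have hmQ : main_lib_id ∉ deps.filter (fun dep => dep != main_lib_id) := by
        intro hmm
        have := List.of_mem_filter hmm
        simp at this
      show (loopA main_lib_id version_id graph
          ((deps.filter (fun dep => dep != main_lib_id)).map (fun dep => (dep, (1 : Int))))
          (PySem.Set.add PySem.Set.empty main_lib_id) PySem.Dict.empty).items = _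
      rw [bridgeLoop main_lib_id version_id graph
        (pvPotD version_id graph PySem.Dict.empty +
          (pvFresh PySem.Dict.empty (deps.filter (fun dep => dep != main_lib_id))).length +
          (if (deps.filter (fun dep => dep != main_lib_id)).isEmpty then 0 else 1))
        1 (deps.filter (fun dep => dep != main_lib_id))
        (PySem.Set.add PySem.Set.empty main_lib_id) PySem.Dict.empty
        (Nat.le_refl _) PySem.Dict.nodup_keys_empty hInv0 hmQ]
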